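-- pv_equiv track=rewrite | github.com/Jamesborlands/l10-meeting-automation | l10_processor.py | compare_todos
-- ===== SOURCE A (Python) =====
-- def compare_todos(new_todos, existing_todos):
--     """
--     Compare new TO-DOs with existing ones to avoid duplicates.
--     Returns truly new items and items that need updates.
--     """
--     truly_new = []
--     updates = []
--
--     for new_todo in new_todos:
--         found = False
--         for existing in existing_todos:
--             # Check if it's the same TO-DO (by WHO and TO-DO text)
--             if (new_todo.get('WHO', '').lower() == existing.get('WHO', '').lower() and
--                 new_todo.get('TO-DO', '').lower() == existing.get('TO-DO', '').lower()):
--                 found = True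
--                 # Check if status needs update
--                 if new_todo.get('DONE?', '') != existing.get('DONE?', ''):
--                     updates.append({
--                         'row': existing['row'],
--                         'new_status': new_todo.get('DONE?', ''),
--                         'new_notes': new_todo.get('NOTES', '')
--                     })
--                 break
--
--         if not found:
--             truly_new.append(new_todo)
--
--     return truly_new, updates
-- ===== SOURCE B (Python) =====
-- def compare_todos(new_todos, existing_todos):
--     """
--     Compare new TO-DOs with existing ones to avoid duplicates.
--     Returns truly new items and items that need updates.
--     Alternative version: index existing items once by (WHO, TO-DO) lowercased
--     (first occurrence kept, matching the first-match rule), then build both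
--     result lists by comprehensions over the matched pairs.
--     """
--     def key(todo):
--         return (todo.get('WHO', '').lower(), todo.get('TO-DO', '').lower())
--
--     index = {}
--     for existing in existing_todos:
--         index.setdefault(key(existing), existing)
--
--     matched = [(n, index.get(key(n))) for n in new_todos]
--     truly_new = [n for n, e in matched if e is None]
--     updates = [{'row': e['row'],
--                 'new_status': n.get('DONE?', ''),
--                 'new_notes': n.get('NOTES', '')}
--                for n, e in matched
--                if e is not None and n.get('DONE?', '') != e.get('DONE?', '')]
--     return truly_new, updates
-- ===== Notes on version B (the rewrite author's own statement) =====
-- stated objective: alternative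
-- what changed: Replaces the nested scan of existing_todos for every new todo with a dict index keyed by (WHO, TO-DO) lowercased, built once via setdefault (keeping the first occurrence per key, matching A's first-match rule), and builds the two result lists by comprehensions over the matched pairs; O(n+m) lookups instead of O(n*m) scans, though A's early break makes the two comparable on duplicate-heavy inputs.
import Mathlib
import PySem

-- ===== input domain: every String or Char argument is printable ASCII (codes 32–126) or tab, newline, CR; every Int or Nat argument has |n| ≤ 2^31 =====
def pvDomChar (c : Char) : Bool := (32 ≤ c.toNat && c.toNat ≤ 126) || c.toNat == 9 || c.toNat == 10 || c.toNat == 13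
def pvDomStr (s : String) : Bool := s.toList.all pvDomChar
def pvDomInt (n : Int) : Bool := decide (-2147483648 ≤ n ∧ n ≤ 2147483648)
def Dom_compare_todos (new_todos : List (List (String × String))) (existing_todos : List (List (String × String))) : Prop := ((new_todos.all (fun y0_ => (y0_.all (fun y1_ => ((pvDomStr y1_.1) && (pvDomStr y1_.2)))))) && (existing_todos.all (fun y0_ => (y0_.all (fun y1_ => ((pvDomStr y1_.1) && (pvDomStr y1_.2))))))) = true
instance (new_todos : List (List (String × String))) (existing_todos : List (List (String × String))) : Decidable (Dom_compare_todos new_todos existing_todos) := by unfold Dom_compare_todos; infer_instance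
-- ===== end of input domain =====

-- B indexes existing todos once by (WHO, TO-DO) lowercased (first occurrence kept) and
-- builds both result lists by comprehensions over the matched pairs; an alternative to
-- A's per-new-todo scan of existing_todos.


-- shared primitives: Python's d.get(k, dflt) on a dict given as an association list,
-- and the update dict both Pythons build with the same literal
-- (existing['row'] raises KeyError in Python when absent — excluded by Pre_compare_todos;
--  the port uses "" there)
def pvGet (d : List (String × String)) (k dflt : String) : String :=
  (PySem.Dict.mk d).getD k dflt

def mkUpdate (e n : List (String × String)) : List (String × String) :=
  [("row", match (PySem.Dict.mk e).get? "row" with | some r => r | none => ""),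
   ("new_status", pvGet n "DONE?" ""),
   ("new_notes", pvGet n "NOTES" "")]

-- ===== PORT A =====
-- inner loop of A: first existing todo matching new_todo on lowercased WHO and TO-DO
def findMatchA (n : List (String × String)) :
    List (List (String × String)) → Option (List (String × String))
  | [] => none
  | e :: rest =>
    if PySem.Str.lower (pvGet n "WHO" "") = PySem.Str.lower (pvGet e "WHO" "") ∧
       PySem.Str.lower (pvGet n "TO-DO" "") = PySem.Str.lower (pvGet e "TO-DO" "")
    then some e else findMatchA n rest

def compare_todos (new_todos : List (List (String × String))) (existing_todos : List (List (String × String))) : (List (List (String × String))) × (List (List (String × String))) :=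
  new_todos.foldl (fun acc new_todo =>
    match findMatchA new_todo existing_todos with
    | none => (acc.1 ++ [new_todo], acc.2)
    | some existing =>
      if pvGet new_todo "DONE?" "" ≠ pvGet existing "DONE?" "" then
        (acc.1, acc.2 ++ [mkUpdate existing new_todo])
      else acc) ([], [])

-- ===== PORT B =====
def keyOf (todo : List (String × String)) : String × String :=
  (PySem.Str.lower (pvGet todo "WHO" ""), PySem.Str.lower (pvGet todo "TO-DO" ""))

-- B's index: first existing per lowercased (WHO, TO-DO) key, via setdefault
def buildIndex (existing_todos : List (List (String × String))) :
    PySem.Dict (String × String) (List (String × String)) :=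
  existing_todos.foldl (fun d e => d.setdefault (keyOf e) e) PySem.Dict.empty

def compare_todos_alt (new_todos : List (List (String × String))) (existing_todos : List (List (String × String))) : (List (List (String × String))) × (List (List (String × String))) :=
  let index := buildIndex existing_todos
  let matched := new_todos.map (fun n => (n, index.get? (keyOf n)))
  let truly_new := (matched.filter (fun p => p.2.isNone)).map (fun p => p.1)
  let updates := matched.filterMap (fun p =>
    match p.2 with
    | none => none
    | some e => if pvGet p.1 "DONE?" "" ≠ pvGet e "DONE?" "" then some (mkUpdate e p.1) else none)
  (truly_new, updates)

-- ===== PRECONDITION & SPEC =====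
-- Pre_ excludes exactly the inputs where Python A (and B) raise KeyError: a new todo
-- whose first (WHO,TO-DO)-match among existing has a different 'DONE?' but no 'row' key.
def Pre_compare_todos (new_todos : List (List (String × String))) (existing_todos : List (List (String × String))) : Prop :=
  ∀ n ∈ new_todos,
    ((existing_todos.find? (fun e => keyOf e == keyOf n)).all (fun e =>
      pvGet n "DONE?" "" == pvGet e "DONE?" "" ||
      ((PySem.Dict.mk e).get? "row").isSome)) = true
instance (new_todos : List (List (String × String))) (existing_todos : List (List (String × String))) : Decidable (Pre_compare_todos new_todos existing_todos) := by unfold Pre_compare_todos; infer_instance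

def pvWitness_compare_todos : (List (List (String × String))) × (List (List (String × String))) :=
  ([[("WHO", "Ann"), ("TO-DO", "ship"), ("DONE?", "yes")]],
   [[("WHO", "ann"), ("TO-DO", "ship"), ("DONE?", "no"), ("row", "3")]])

def Spec_compare_todos (new_todos : List (List (String × String))) (existing_todos : List (List (String × String))) (out : (List (List (String × String))) × (List (List (String × String)))) : Prop := out = compare_todos_alt new_todos existing_todos
instance (new_todos : List (List (String × String))) (existing_todos : List (List (String × String))) (out : (List (List (String × String))) × (List (List (String × String)))) : Decidable (Spec_compare_todos new_todos existing_todos out) := by unfold Spec_compare_todos; infer_instance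

-- ===== CLAIM (what is proved, stated in full; the proofs are below) =====
def Claim_equal_compare_todos : Prop := ∀ (new_todos : List (List (String × String))) (existing_todos : List (List (String × String))), Dom_compare_todos new_todos existing_todos → Pre_compare_todos new_todos existing_todos → Spec_compare_todos new_todos existing_todos (compare_todos new_todos existing_todos)

-- ===== LEMMAS AND PROOFS =====

-- A's inner scan is the first match by key
theorem findMatchA_eq_find? (n : List (String × String)) (es : List (List (String × String))) :
    findMatchA n es = es.find? (fun e => keyOf e == keyOf n) := by
  induction es with
  | nil => rfl
  | cons e rest ih =>
    rw [findMatchA, List.find?_cons]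
    by_cases h : PySem.Str.lower (pvGet n "WHO" "") = PySem.Str.lower (pvGet e "WHO" "") ∧
        PySem.Str.lower (pvGet n "TO-DO" "") = PySem.Str.lower (pvGet e "TO-DO" "")
    · have hb : (keyOf e == keyOf n) = true :=
        beq_iff_eq.mpr (Prod.ext_iff.mpr ⟨h.1.symm, h.2.symm⟩)
      rw [if_pos h, hb]
    · have hb : (keyOf e == keyOf n) = false :=
        beq_eq_false_iff_ne.mpr (fun hc =>
          h ⟨(Prod.ext_iff.mp hc).1.symm, (Prod.ext_iff.mp hc).2.symm⟩)
      rw [if_neg h, hb]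
      exact ih

-- B's index lookup: the setdefault fold, from any starting dict
theorem buildIndex_aux (es : List (List (String × String)))
    (d : PySem.Dict (String × String) (List (String × String))) (k : String × String) :
    (es.foldl (fun d e => d.setdefault (keyOf e) e) d).get? k
      = (d.get? k).or (es.find? (fun e => keyOf e == k)) := by
  induction es generalizing d with
  | nil => simp
  | cons e rest ih =>
    rw [List.foldl_cons, List.find?_cons]
    by_cases hc : d.contains (keyOf e) = true
    · rw [PySem.Dict.setdefault_of_contains d e hc, ih]
      by_cases hk : keyOf e = k
      · subst hk
        have hs : (d.get? (keyOf e)).isSome := by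
          rw [PySem.Dict.contains_eq_isSome_get?] at hc; exact hc
        rcases Option.isSome_iff_exists.mp hs with ⟨v, hv⟩
        rw [hv, beq_self_eq_true]
        rfl
      · rw [beq_eq_false_iff_ne.mpr hk]
    · rw [Bool.not_eq_true] at hc
      rw [PySem.Dict.setdefault_of_not_contains d e hc, ih]
      rw [PySem.Dict.contains_eq_isSome_get?, Option.isSome_eq_false_iff,
        Option.isNone_iff_eq_none] at hc
      by_cases hk : keyOf e = k
      · subst hk
        rw [PySem.Dict.get?_insert_self, hc, beq_self_eq_true]
        rfl
      · rw [PySem.Dict.get?_insert_of_ne d e (fun h => hk h.symm),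
          beq_eq_false_iff_ne.mpr hk]

theorem buildIndex_get? (es : List (List (String × String))) (k : String × String) :
    (buildIndex es).get? k = es.find? (fun e => keyOf e == k) := by
  unfold buildIndex
  rw [buildIndex_aux]
  simp

-- A's fold, characterised: it appends the filtered new todos and the mapped updates
theorem foldlA_eq (ex : List (List (String × String)))
    (l : List (List (String × String)))
    (acc : (List (List (String × String))) × (List (List (String × String)))) :
    l.foldl (fun acc new_todo =>
      match findMatchA new_todo ex with
      | none => (acc.1 ++ [new_todo], acc.2)
      | some existing =>
        if pvGet new_todo "DONE?" "" ≠ pvGet existing "DONE?" "" then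
          (acc.1, acc.2 ++ [mkUpdate existing new_todo])
        else acc) acc
    = (acc.1 ++ l.filter (fun n => (ex.find? (fun e => keyOf e == keyOf n)).isNone),
       acc.2 ++ l.filterMap (fun n =>
         match ex.find? (fun e => keyOf e == keyOf n) with
         | none => none
         | some e => if pvGet n "DONE?" "" ≠ pvGet e "DONE?" "" then some (mkUpdate e n) else none)) := by
  induction l generalizing acc with
  | nil => simp
  | cons n l ih =>
    rw [List.foldl_cons, ih]
    rw [findMatchA_eq_find?]
    cases h : ex.find? (fun e => keyOf e == keyOf n) with
    | none => simp [h]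
    | some e =>
      by_cases hd : pvGet n "DONE?" "" ≠ pvGet e "DONE?" ""
      · simp [h, hd]
      · simp [h, hd]

-- the two implementations agree
theorem compare_todos_eq (new_todos existing_todos : List (List (String × String))) :
    compare_todos new_todos existing_todos = compare_todos_alt new_todos existing_todos := by
  unfold compare_todos compare_todos_alt
  rw [foldlA_eq]
  dsimp only
  have hix : (fun n => (n, (buildIndex existing_todos).get? (keyOf n)))
      = (fun n : List (String × String) =>
          (n, existing_todos.find? (fun e => keyOf e == keyOf n))) := by
    funext n; rw [buildIndex_get?]
  rw [hix]
  refine Prod.ext ?_ ?_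
  · simp [List.filter_map, List.map_map, Function.comp_def]
  · simp [List.filterMap_map]

-- ===== VERDICT (by name: the statement is the Claim_ definition above) =====
theorem compare_todos_spec : Claim_equal_compare_todos := by
  intro new_todos existing_todos _ _
  unfold Spec_compare_todos
  exact compare_todos_eq new_todos existing_todos
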